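-- pv_equiv track=rewrite | github.com/francobramucci/LCC | 1er_Año/Programacion_II/Python/practica4.py | lower_than_nth
-- ===== SOURCE A (Python) =====
-- def lower_than_nth(l: list, n: int):
--     l.sort()
--     nth = l[n]
--     s = set()
--     for i in range(nth):
--         if i not in l:
--             s.add(i)
--     return s
-- ===== SOURCE B (Python) =====
-- def lower_than_nth(l: list, n: int):
--     # Same result as A (sorts l in place, like A); instead of testing each i in
--     # range(nth) for list membership, walk the sorted list once and emit the gaps.
--     l.sort()
--     nth = l[n]
--     s = set()
--     expected = 0
--     for v in l:
--         x = expected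
--         while x < v and x < nth:
--             s.add(x)
--             x += 1
--         expected = max(expected, v + 1)
--     x = expected
--     while x < nth:
--         s.add(x)
--         x += 1
--     return s
-- ===== Notes on version B (the rewrite author's own statement) =====
-- stated objective: alternative
-- what changed: Instead of scanning range(l[n]) and testing each value for list membership, B makes one forward pass over the sorted list and emits the integer gaps between consecutive elements up to l[n]; Pre_ excludes only the inputs where A raises IndexError (empty list or index out of range).
import Mathlib
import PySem

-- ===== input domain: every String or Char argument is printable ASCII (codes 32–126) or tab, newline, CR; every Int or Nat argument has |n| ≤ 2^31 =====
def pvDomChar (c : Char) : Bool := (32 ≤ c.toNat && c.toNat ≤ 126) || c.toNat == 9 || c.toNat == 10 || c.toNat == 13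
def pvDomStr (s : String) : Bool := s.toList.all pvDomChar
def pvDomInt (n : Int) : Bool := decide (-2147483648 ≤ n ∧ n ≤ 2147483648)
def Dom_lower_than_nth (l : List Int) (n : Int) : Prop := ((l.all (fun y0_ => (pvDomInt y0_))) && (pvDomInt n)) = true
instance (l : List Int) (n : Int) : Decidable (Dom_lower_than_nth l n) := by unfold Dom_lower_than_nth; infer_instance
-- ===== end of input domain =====

-- B replaces A's membership scan over range(l[n]) by a single gap-walk over the
-- sorted list (objective: alternative). Both A and B sort l in place in Python;
-- the equivalence proved here is about the RETURN value.

-- ===== PORT A =====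
def lower_than_nth (l : List Int) (n : Int) : List Int :=
  let ls := PySem.List.sorted l (fun x => x)
  match PySem.List.pyGet? ls n with
  | none => []   -- IndexError in Python; excluded by Pre_
  | some nth =>
      (PySem.List.pyRange 0 nth).foldl
        (fun s i => if ls.contains i then s else PySem.Set.add s i)
        PySem.Set.empty

-- ===== PORT B =====
-- the for-loop over the sorted list: each step adds the fresh gap values
-- expected..min(v,nth)-1 (fresh, so set.add appends), then bumps expected;
-- the trailing while-loop is the base case.
def gapFill (xs : List Int) (e nth : Int) : List Int :=
  match xs with
  | [] => PySem.List.pyRange e nth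
  | v :: rest => PySem.List.pyRange e (min v nth) ++ gapFill rest (max e (v + 1)) nth

def lower_than_nth_alt (l : List Int) (n : Int) : List Int :=
  let ls := PySem.List.sorted l (fun x => x)
  match PySem.List.pyGet? ls n with
  | none => []   -- IndexError in Python; excluded by Pre_
  | some nth => gapFill ls 0 nth

-- ===== PRECONDITION & SPEC =====
-- Pre_ excludes exactly the inputs where A raises IndexError at l[n]: the empty list or an index out of range.
def Pre_lower_than_nth (l : List Int) (n : Int) : Prop := PySem.Raise.InRange l.length n
instance (l : List Int) (n : Int) : Decidable (Pre_lower_than_nth l n) := by unfold Pre_lower_than_nth; infer_instance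
def pvWitness_lower_than_nth : List Int × Int := ([3, 0, 3], 2)

def Spec_lower_than_nth (l : List Int) (n : Int) (out : List Int) : Prop := out = lower_than_nth_alt l n
instance (l : List Int) (n : Int) (out : List Int) : Decidable (Spec_lower_than_nth l n out) := by unfold Spec_lower_than_nth; infer_instance

-- ===== CLAIM (what is proved, stated in full; the proofs are below) =====
def Claim_equal_lower_than_nth : Prop := ∀ (l : List Int) (n : Int), Dom_lower_than_nth l n → Pre_lower_than_nth l n → Spec_lower_than_nth l n (lower_than_nth l n)

-- ===== LEMMAS AND PROOFS =====

-- pyRange a b is strictly increasing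
lemma pyRange_pairwise_lt (a b : Int) : (PySem.List.pyRange a b).Pairwise (· < ·) := by
  induction hk : (b - a).toNat generalizing a with
  | zero =>
      have : PySem.List.pyRange a b = [] :=
        List.eq_nil_iff_forall_not_mem.2 (fun x hx => by
          rw [PySem.List.mem_pyRange_one] at hx; omega)
      simp [this]
  | succ k ih =>
      have hab : a < b := by omega
      rw [PySem.List.pyRange_one_cons hab]
      exact List.Pairwise.cons
        (fun x hx => by rw [PySem.List.mem_pyRange_one] at hx; omega)
        (ih (a + 1) (by omega))

-- A's loop: adding the fresh non-members of a duplicate-free range appends them in order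
lemma foldA (ls : List Int) (r : List Int) (hr : r.Nodup) :
    ∀ acc : List Int, (∀ i ∈ r, i ∉ acc) →
      r.foldl (fun s i => if ls.contains i then s else PySem.Set.add s i) acc
        = acc ++ r.filter (fun i => !ls.contains i) := by
  induction r with
  | nil => intro acc _; simp
  | cons i r' ih =>
      intro acc hdisj
      rcases List.nodup_cons.1 hr with ⟨hi, hr'⟩
      by_cases hc : ls.contains i
      · simp only [List.foldl_cons, hc, if_pos, List.filter_cons, Bool.not_true,
          Bool.false_eq_true, if_neg, not_false_iff]
        exact ih hr' acc (fun j hj => hdisj j (List.mem_cons_of_mem _ hj))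
      · have hcf : ls.contains i = false := by simpa using hc
        have hacc : i ∉ acc := hdisj i (List.mem_cons_self ..)
        have hadd : PySem.Set.add acc i = acc ++ [i] := by
          simp [PySem.Set.add, PySem.Set.contains, hacc]
        simp only [List.foldl_cons, hcf, Bool.false_eq_true, if_neg, not_false_iff, hadd]
        rw [ih hr' (acc ++ [i]) (fun j hj => by
          simp only [List.mem_append, List.mem_singleton]
          rintro (h | rfl)
          · exact hdisj j (List.mem_cons_of_mem _ hj) h
          · exact hi hj)]
        have him : i ∉ ls := by simpa using hc
        simp [him, List.append_assoc]

-- B's gap-walk over a sorted list collects exactly the non-members of [e, nth)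
lemma gapFill_mem (nth : Int) :
    ∀ (xs : List Int), xs.Pairwise (· ≤ ·) →
      ∀ e x, x ∈ gapFill xs e nth ↔ (e ≤ x ∧ x < nth ∧ x ∉ xs) := by
  intro xs
  induction xs with
  | nil =>
      intro _ e x
      simp [gapFill, PySem.List.mem_pyRange_one]
  | cons v rest ih =>
      intro hp e x
      rcases List.pairwise_cons.1 hp with ⟨hv, hrest⟩
      simp only [gapFill, List.mem_append, PySem.List.mem_pyRange_one,
        ih hrest, List.mem_cons, not_or]
      constructor
      · rintro (⟨h1, h2⟩ | ⟨h1, h2, h3⟩)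
        · refine ⟨h1, by omega, by omega, fun hx => ?_⟩
          have := hv x hx; omega
        · exact ⟨by omega, h2, by omega, h3⟩
      · rintro ⟨h1, h2, h3, h4⟩
        by_cases hlt : x < v
        · exact Or.inl ⟨h1, by omega⟩
        · exact Or.inr ⟨by omega, h2, h4⟩

lemma gapFill_pairwise (nth : Int) :
    ∀ (xs : List Int), xs.Pairwise (· ≤ ·) →
      ∀ e, (gapFill xs e nth).Pairwise (· < ·) := by
  intro xs
  induction xs with
  | nil => intro _ e; exact pyRange_pairwise_lt e nth
  | cons v rest ih =>
      intro hp e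
      rcases List.pairwise_cons.1 hp with ⟨_, hrest⟩
      refine List.pairwise_append.2 ⟨pyRange_pairwise_lt _ _, ih hrest _, ?_⟩
      intro a ha b hb
      rw [PySem.List.mem_pyRange_one] at ha
      have hb' := (gapFill_mem nth rest hrest _ b).1 hb
      omega

-- two strictly increasing lists with the same members are equal
lemma eq_of_pairwise_lt_ext (l₁ l₂ : List Int)
    (h₁ : l₁.Pairwise (· < ·)) (h₂ : l₂.Pairwise (· < ·))
    (h : ∀ x, x ∈ l₁ ↔ x ∈ l₂) : l₁ = l₂ := by
  have nd₁ : l₁.Nodup := h₁.imp ne_of_lt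
  have nd₂ : l₂.Nodup := h₂.imp ne_of_lt
  have hperm : l₁.Perm l₂ := (List.perm_ext_iff_of_nodup nd₁ nd₂).2 h
  have e₁ : PySem.List.sorted l₂ (fun x => x) = l₁ :=
    PySem.List.sorted_eq_of_perm_of_pairwise_lt l₂ l₁ (fun x => x) hperm h₁
  have e₂ : PySem.List.sorted l₂ (fun x => x) = l₂ :=
    PySem.List.sorted_eq_of_perm_of_pairwise_lt l₂ l₂ (fun x => x) (List.Perm.refl l₂) h₂
  rw [← e₁, e₂]

-- A's membership loop and B's gap-walk produce the same list on a sorted ls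
lemma fold_eq_gapFill (ls : List Int) (hsort : ls.Pairwise (· ≤ ·)) (nth : Int) :
    (PySem.List.pyRange 0 nth).foldl
        (fun s i => if ls.contains i then s else PySem.Set.add s i) PySem.Set.empty
      = gapFill ls 0 nth := by
  have hrange := pyRange_pairwise_lt 0 nth
  have hA : (PySem.List.pyRange 0 nth).foldl
      (fun s i => if ls.contains i then s else PySem.Set.add s i) PySem.Set.empty
      = (PySem.List.pyRange 0 nth).filter (fun i => !ls.contains i) := by
    simpa [PySem.Set.empty] using
      foldA ls (PySem.List.pyRange 0 nth) (hrange.imp ne_of_lt)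
        PySem.Set.empty (fun i _ => List.not_mem_nil)
  rw [hA]
  refine eq_of_pairwise_lt_ext _ _
    (List.Pairwise.sublist List.filter_sublist hrange)
    (gapFill_pairwise nth ls hsort 0) ?_
  intro x
  simp [List.mem_filter, PySem.List.mem_pyRange_one, gapFill_mem nth ls hsort 0, and_assoc]

-- ===== VERDICT (by name: the statement is the Claim_ definition above) =====
theorem lower_than_nth_spec : Claim_equal_lower_than_nth := by
  intro l n _ _
  unfold Spec_lower_than_nth lower_than_nth lower_than_nth_alt
  cases hget : PySem.List.pyGet? (PySem.List.sorted l (fun x => x)) n with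
  | none => simp [hget]
  | some nth =>
      simp only [hget]
      exact fold_eq_gapFill _ (PySem.List.sorted_pairwise l (fun x => x)) nth
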